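-- pv_equiv track=rewrite | github.com/yaneurao/Pytra | src/py2rs.py | _rust_raw_string_literal
-- ===== SOURCE A (Python) =====
-- def _rust_raw_string_literal(text: str) -> str:
--     """任意テキストを Rust の raw string literal へ変換する。"""
--     for n in range(1, 32):
--         fence = "#" * n
--         end_seq = f'"{fence}'
--         if end_seq not in text:
--             return f'r{fence}"{text}"{fence}'
--     # ほぼ起こらない保険。通常文字列へエスケープする。
--     escaped = (
--         text.replace("\\", "\\\\")
--         .replace('"', '\\"')
--         .replace("\n", "\\n")
--         .replace("\r", "\\r")
--         .replace("\t", "\\t")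
--     )
--     return f'"{escaped}"'
-- ===== SOURCE B (Python) =====
-- def _rust_raw_string_literal(text: str) -> str:
--     """Single scan: find the max run of '#' immediately following a '"', then pick fence length max+1."""
--     best = 0
--     run = 0
--     active = False
--     for ch in text:
--         if ch == '"':
--             active = True
--             run = 0
--         elif ch == '#' and active:
--             run += 1
--             if run > best:
--                 best = run
--         else:
--             active = False
--             run = 0
--     if best <= 30:
--         fence = "#" * (best + 1)
--         return f'r{fence}"{text}"{fence}'
--     escaped = (
--         text.replace("\\", "\\\\")
--         .replace('"', '\\"')
--         .replace("\n", "\\n")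
--         .replace("\r", "\\r")
--         .replace("\t", "\\t")
--     )
--     return f'"{escaped}"'
-- ===== Notes on version B (the rewrite author's own statement) =====
-- stated objective: alternative
-- what changed: Instead of A's up-to-31 repeated substring searches for ever-longer candidate fences, B makes a single left-to-right scan computing the maximum run of hash characters immediately following a double quote; the fence length is that maximum plus one, with the identical escaped fallback when the maximum exceeds 30.
import Mathlib
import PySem

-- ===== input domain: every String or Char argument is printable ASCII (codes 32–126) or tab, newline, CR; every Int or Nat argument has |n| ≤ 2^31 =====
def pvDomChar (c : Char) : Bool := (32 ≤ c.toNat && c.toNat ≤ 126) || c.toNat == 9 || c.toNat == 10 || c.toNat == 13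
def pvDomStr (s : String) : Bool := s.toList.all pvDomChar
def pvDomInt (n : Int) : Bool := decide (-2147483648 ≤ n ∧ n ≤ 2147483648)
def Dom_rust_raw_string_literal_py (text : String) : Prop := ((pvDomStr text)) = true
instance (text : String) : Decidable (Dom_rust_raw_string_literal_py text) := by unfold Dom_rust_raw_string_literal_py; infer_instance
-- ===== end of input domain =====

-- B replaces A's up-to-31 repeated substring searches by one left-to-right scan computing the
-- maximum run of hash characters immediately after a double quote (objective: alternative, single pass).

-- the escaped fallback (identical five-.replace chain in both Pythons)
def rustEscape (cs : List Char) : List Char :=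
  '"' ::
    (PySem.Chars.replace
      (PySem.Chars.replace
        (PySem.Chars.replace
          (PySem.Chars.replace
            (PySem.Chars.replace cs ['\\'] ['\\', '\\'])
            ['"'] ['\\', '"'])
          ['\n'] ['\\', 'n'])
        ['\r'] ['\\', 'r'])
      ['\t'] ['\\', 't']) ++ ['"']

-- ===== PORT A =====
-- 'for n in range(1, 32): …' as structural recursion over the range list
def rustA_loop (ns : List Int) (cs : List Char) : List Char :=
  match ns with
  | [] => rustEscape cs
  | n :: rest =>
      let fence := PySem.List.pyRepeat ['#'] n
      if PySem.Chars.isIn ('"' :: fence) cs = false then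
        'r' :: fence ++ '"' :: cs ++ '"' :: fence
      else rustA_loop rest cs

def rust_raw_string_literal_py (text : String) : String :=
  String.ofList (rustA_loop (PySem.List.pyRange 1 32 1) text.toList)

-- ===== PORT B =====
-- one step of Source B's scan; state = (active, run, best)
def rustB_step (s : Bool × Int × Int) (ch : Char) : Bool × Int × Int :=
  if ch = '"' then (true, 0, s.2.2)
  else if ch = '#' ∧ s.1 = true then
    let run := s.2.1 + 1
    (s.1, run, if run > s.2.2 then run else s.2.2)
  else (false, 0, s.2.2)

def rust_raw_string_literal_py_alt (text : String) : String :=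
  let st := text.toList.foldl rustB_step (false, 0, 0)
  let best := st.2.2
  if best ≤ 30 then
    let fence := PySem.List.pyRepeat ['#'] (best + 1)
    String.ofList ('r' :: fence ++ '"' :: text.toList ++ '"' :: fence)
  else
    String.ofList (rustEscape text.toList)

-- ===== PRECONDITION & SPEC =====
def Spec_rust_raw_string_literal_py (text : String) (out : String) : Prop := out = rust_raw_string_literal_py_alt text
instance (text : String) (out : String) : Decidable (Spec_rust_raw_string_literal_py text out) := by unfold Spec_rust_raw_string_literal_py; infer_instance

-- ===== CLAIM (what is proved, stated in full; the proofs are below) =====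
def Claim_equal_rust_raw_string_literal_py : Prop := ∀ (text : String), Dom_rust_raw_string_literal_py text → Spec_rust_raw_string_literal_py text (rust_raw_string_literal_py text)

-- ===== LEMMAS AND PROOFS =====

-- length of the '#' run at the head
def runHash : List Char → Nat
  | [] => 0
  | c :: t => if c = '#' then runHash t + 1 else 0

-- maximum, over every '"' in cs, of the '#' run immediately after it
def maxAfterQuote : List Char → Nat
  | [] => 0
  | c :: t => if c = '"' then max (runHash t) (maxAfterQuote t) else maxAfterQuote t

theorem replicate_hash_prefix_iff (t : List Char) (n : Nat) :
    (List.replicate n '#' <+: t) ↔ n ≤ runHash t := by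
  induction t generalizing n with
  | nil =>
    cases n with
    | zero => simp [runHash]
    | succ k => simp [List.replicate, runHash]
  | cons c t ih =>
    cases n with
    | zero => simp
    | succ k =>
      simp only [List.replicate, List.cons_prefix_cons, runHash]
      by_cases hc : c = '#'
      · subst hc; simp [ih]
      · have : ¬ ('#' = c) := fun h => hc h.symm
        simp [this, hc]

theorem quote_fence_infix_iff (cs : List Char) (n : Nat) (hn : 1 ≤ n) :
    (('"' :: List.replicate n '#') <:+: cs) ↔ n ≤ maxAfterQuote cs := by
  induction cs with
  | nil =>
    simp only [List.infix_nil, maxAfterQuote]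
    constructor
    · intro h; simp at h
    · omega
  | cons c t ih =>
    rw [List.infix_cons_iff, List.cons_prefix_cons, replicate_hash_prefix_iff, ih]
    simp only [maxAfterQuote]
    by_cases hc : c = '"'
    · subst hc
      simp
    · have : ¬ ('"' = c) := fun h => hc h.symm
      simp [this, hc]

-- the potential-best function of B's scan from state (a, r, ·)
def scanM : Bool → Int → List Char → Int
  | _, _, [] => 0
  | a, r, c :: t =>
      if c = '"' then scanM true 0 t
      else if c = '#' ∧ a = true then max (r + 1) (scanM a (r + 1) t)
      else scanM false 0 t

theorem foldl_rustB_best (cs : List Char) :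
    ∀ (a : Bool) (r b : Int), 0 ≤ b →
      (cs.foldl rustB_step (a, r, b)).2.2 = max b (scanM a r cs) := by
  induction cs with
  | nil =>
    intro a r b hb
    simp only [List.foldl_nil, scanM]
    omega
  | cons c t ih =>
    intro a r b hb
    by_cases h1 : c = '"'
    · simp only [List.foldl_cons, scanM, rustB_step, if_pos h1]
      rw [ih true 0 b hb]
    · by_cases h2 : c = '#' ∧ a = true
      · simp only [List.foldl_cons, scanM, rustB_step, if_neg h1, if_pos h2]
        have hbest : (if r + 1 > b then r + 1 else b) = max b (r + 1) := by omega
        rw [hbest, ih a (r + 1) (max b (r + 1)) (by omega)]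
        omega
      · simp only [List.foldl_cons, scanM, rustB_step, if_neg h1, if_neg h2]
        rw [ih false 0 b hb]

theorem scanM_char (cs : List Char) :
    (∀ r : Int, 0 ≤ r →
       scanM true r cs =
         max (if runHash cs = 0 then 0 else r + (runHash cs : Int)) (maxAfterQuote cs : Int))
    ∧ scanM false 0 cs = (maxAfterQuote cs : Int) := by
  induction cs with
  | nil => simp [scanM, runHash, maxAfterQuote]
  | cons c t ih =>
    obtain ⟨ih1, ih2⟩ := ih
    by_cases hq : c = '"'
    · have hrun : runHash (c :: t) = 0 := by simp [runHash, hq]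
      have hmq : maxAfterQuote (c :: t) = max (runHash t) (maxAfterQuote t) := by
        simp [maxAfterQuote, hq]
      constructor
      · intro r hr
        have h1 : scanM true r (c :: t) = scanM true 0 t := by simp [scanM, hq]
        rw [h1, ih1 0 le_rfl, hrun, hmq]
        push_cast
        split_ifs with h0 <;> omega
      · have h1 : scanM false 0 (c :: t) = scanM true 0 t := by simp [scanM, hq]
        rw [h1, ih1 0 le_rfl, hmq]
        push_cast
        split_ifs with h0 <;> omega
    · by_cases hh : c = '#'
      · have hrun : runHash (c :: t) = runHash t + 1 := by simp [runHash, hh]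
        have hmq : maxAfterQuote (c :: t) = maxAfterQuote t := by simp [maxAfterQuote, hq]
        constructor
        · intro r hr
          have h1 : scanM true r (c :: t) = max (r + 1) (scanM true (r + 1) t) := by
            simp [scanM, hh]
          rw [h1, ih1 (r + 1) (by omega), hrun, hmq]
          push_cast
          split_ifs with h0 <;> omega
        · have h1 : scanM false 0 (c :: t) = scanM false 0 t := by
            simp [scanM, hh]
          rw [h1, ih2, hmq]
      · have hrun : runHash (c :: t) = 0 := by simp [runHash, hh]
        have hmq : maxAfterQuote (c :: t) = maxAfterQuote t := by simp [maxAfterQuote, hq]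
        constructor
        · intro r hr
          have h1 : scanM true r (c :: t) = scanM false 0 t := by simp [scanM, hq, hh]
          rw [h1, ih2, hrun, hmq]
          have := (maxAfterQuote t).cast_nonneg (α := Int)
          omega
        · have h1 : scanM false 0 (c :: t) = scanM false 0 t := by simp [scanM, hq, hh]
          rw [h1, ih2, hmq]

theorem foldl_rustB_eq_maxAfterQuote (cs : List Char) :
    (cs.foldl rustB_step (false, 0, 0)).2.2 = (maxAfterQuote cs : Int) := by
  rw [foldl_rustB_best cs false 0 0 le_rfl, (scanM_char cs).2]
  have := (maxAfterQuote cs).cast_nonneg (α := Int)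
  omega

-- A's loop, started at fence length k ≤ m + 1, returns the m+1 raw literal when m ≤ 30
theorem rustA_loop_spec (cs : List Char) (m : Nat) (hm : m = maxAfterQuote cs) :
    ∀ (fuel k : Nat), k + fuel = 32 → 1 ≤ k → k ≤ m + 1 →
      rustA_loop (PySem.List.pyRange (k : Int) 32 1) cs =
        if m ≤ 30 then
          'r' :: List.replicate (m + 1) '#' ++ '"' :: cs ++ '"' :: List.replicate (m + 1) '#'
        else rustEscape cs := by
  intro fuel
  induction fuel with
  | zero =>
    intro k h32 h1 hk
    have hk32 : k = 32 := by omega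
    subst hk32
    have hcast : ((32 : Nat) : Int) = 32 := by norm_num
    rw [hcast, show PySem.List.pyRange (32 : Int) 32 1 = [] from by decide]
    have : ¬ m ≤ 30 := by omega
    simp [rustA_loop, this]
  | succ f ihf =>
    intro k h32 h1 hk
    have hklt : (k : Int) < 32 := by exact_mod_cast (by omega : k < 32)
    rw [PySem.List.pyRange_one_cons hklt]
    simp only [rustA_loop]
    have hfence : PySem.List.pyRepeat ['#'] (k : Int) = List.replicate k '#' := by
      rw [PySem.List.pyRepeat_singleton]; simp
    rw [hfence]
    have hiff := quote_fence_infix_iff cs k (by omega)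
    by_cases hin : PySem.Chars.isIn ('"' :: List.replicate k '#') cs = false
    · -- k is not blocked, so k = m + 1 and m ≤ 30
      have hnot : ¬ (('"' :: List.replicate k '#') <:+: cs) :=
        (PySem.Chars.isIn_eq_false_iff _ _).mp hin
      have hkm : ¬ k ≤ maxAfterQuote cs := fun h => hnot (hiff.mpr h)
      have hkeq : k = m + 1 := by omega
      have hm30 : m ≤ 30 := by omega
      rw [if_pos hin, if_pos hm30, hkeq]
    · have htrue : PySem.Chars.isIn ('"' :: List.replicate k '#') cs = true := by
        cases h : PySem.Chars.isIn ('"' :: List.replicate k '#') cs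
        · exact absurd h hin
        · rfl
      have hkm : k ≤ m := by
        rw [hm]; exact hiff.mp ((PySem.Chars.isIn_iff_infix _ _).mp htrue)
      rw [if_neg hin]
      have hcast : ((k : Int) + 1) = ((k + 1 : Nat) : Int) := by push_cast; ring
      rw [hcast]
      exact ihf (k + 1) (by omega) (by omega) (by omega)

-- ===== VERDICT (by name: the statement is the Claim_ definition above) =====
theorem rust_raw_string_literal_py_spec : Claim_equal_rust_raw_string_literal_py := by
  intro text _
  show rust_raw_string_literal_py text = rust_raw_string_literal_py_alt text
  simp only [rust_raw_string_literal_py, rust_raw_string_literal_py_alt,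
    foldl_rustB_eq_maxAfterQuote]
  set cs := text.toList with hcs
  set m := maxAfterQuote cs with hm
  have hA := rustA_loop_spec cs m hm 31 1 (by omega) le_rfl (by omega)
  push_cast at hA
  rw [hA]
  by_cases h30 : m ≤ 30
  · have h30' : ((m : Int) ≤ 30) := by exact_mod_cast h30
    have hfence : PySem.List.pyRepeat ['#'] ((m : Int) + 1) = List.replicate (m + 1) '#' := by
      rw [PySem.List.pyRepeat_singleton]
      congr 1
    simp [h30, h30', hfence]
  · have h30' : ¬ ((m : Int) ≤ 30) := by exact_mod_cast h30
    simp [h30, h30']
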